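-- pv_equiv track=rewrite | github.com/miliar/Code_Jam_Webscraper | solutions_python/Problem_201/538.py | cotepersonne
-- ===== SOURCE A (Python) =====
-- def cotepersonne(n):
--
--     p=1
--     puissance=1
--     compteur2=0
--     while n>=p:
--         puissance=puissance*2
--         p=p+puissance
--         compteur2=compteur2+1
--         # compte le nombre de personnes déjà passées
--
--
--
--     # donc la on a n compris dans [p-puissance, p[
-- #    compteur=p-puissance-puissance/2 # nombre de personnes passées avant
--     return [n-p+puissance+1,compteur2]
-- ===== SOURCE B (Python) =====
-- def cotepersonne(n):
--     k = (n + 1).bit_length() - 1 if n > 0 else 0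
--     return [n - 2**k + 2, k]
-- ===== Notes on version B (the rewrite author's own statement) =====
-- stated objective: faster
-- what changed: Replaced the doubling while-loop and its three accumulators with a closed form: the level k comes directly from the bit length of n+1 (zero when the loop would not run) and the answer is [n - 2**k + 2, k].
import Mathlib
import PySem

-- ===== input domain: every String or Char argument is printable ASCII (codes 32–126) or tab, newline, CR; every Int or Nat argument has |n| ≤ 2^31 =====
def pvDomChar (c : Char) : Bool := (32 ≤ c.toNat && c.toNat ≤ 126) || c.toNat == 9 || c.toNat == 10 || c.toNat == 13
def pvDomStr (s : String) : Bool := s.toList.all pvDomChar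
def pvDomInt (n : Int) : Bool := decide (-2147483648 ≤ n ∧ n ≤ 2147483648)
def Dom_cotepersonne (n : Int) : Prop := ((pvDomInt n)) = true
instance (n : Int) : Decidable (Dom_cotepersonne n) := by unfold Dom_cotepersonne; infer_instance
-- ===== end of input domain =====

-- B replaces A's doubling while-loop by a closed form from the bit length; return values agree for every Int input.

-- ===== PORT A =====
-- the while-loop of A; `puiss` carries a positivity proof only so the loop's termination
-- (p strictly grows) is visible to Lean — the computed values are exactly A's
def cotepersonneLoop (n p : Int) (puiss : {q : Int // 0 < q}) (c : Int) : List Int :=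
  if n ≥ p then
    cotepersonneLoop n (p + puiss.1 * 2) ⟨puiss.1 * 2, by have := puiss.2; omega⟩ (c + 1)
  else
    [n - p + puiss.1 + 1, c]
termination_by (n + 1 - p).toNat
decreasing_by
  have := puiss.2
  simp only [ge_iff_le] at *
  omega

def cotepersonne (n : Int) : List Int :=
  cotepersonneLoop n 1 ⟨1, by omega⟩ 0

-- ===== PORT B =====
-- (n+1).bit_length() - 1 for n > 0 is Nat.log 2 (n+1).toNat (exact: bit_length m = log2 m + 1 for m ≥ 1)
def cotepersonne_alt (n : Int) : List Int :=
  let k : Nat := if n > 0 then Nat.log 2 (n + 1).toNat else 0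
  [n - 2 ^ k + 2, (k : Int)]

-- ===== PRECONDITION & SPEC =====
def Spec_cotepersonne (n : Int) (out : List Int) : Prop := out = cotepersonne_alt n
instance (n : Int) (out : List Int) : Decidable (Spec_cotepersonne n out) := by unfold Spec_cotepersonne; infer_instance

-- ===== CLAIM (what is proved, stated in full; the proofs are below) =====
def Claim_equal_cotepersonne : Prop := ∀ (n : Int), Dom_cotepersonne n → Spec_cotepersonne n (cotepersonne n)

-- ===== LEMMAS AND PROOFS =====

-- invariant characterisation of A's loop: at level k we have p = 2^(k+1)-1, puiss = 2^k
theorem cotepersonneLoop_eq (n : Int) (d : Nat) :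
    ∀ (k : Nat) (c : Int) (hpos : 0 < (2:Int) ^ k),
      (2:Int) ^ k ≤ n + 1 →
      Nat.log 2 (n + 1).toNat - k = d →
      cotepersonneLoop n ((2:Int) ^ (k + 1) - 1) ⟨(2:Int) ^ k, hpos⟩ c =
        [n - 2 ^ Nat.log 2 (n + 1).toNat + 2,
         c + ((Nat.log 2 (n + 1).toNat - k : Nat) : Int)] := by
  induction d with
  | zero =>
    intro k c hpos hk hd
    have hn1 : (0:Int) < n + 1 := lt_of_lt_of_le hpos hk
    have htn : ((n + 1).toNat : Int) = n + 1 := Int.toNat_of_nonneg (by omega)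
    -- K ≤ k (from hd) and k ≤ K (from hk), so K = k
    have hkK : k ≤ Nat.log 2 (n + 1).toNat := by
      apply (Nat.le_log_iff_pow_le (by norm_num) (by omega)).mpr
      have : ((2:Int) ^ k : Int) = ((2 ^ k : Nat) : Int) := by push_cast; ring
      omega
    have hKk : Nat.log 2 (n + 1).toNat = k := by omega
    rw [cotepersonneLoop]
    have hlt : ¬ n ≥ (2:Int) ^ (k + 1) - 1 := by
      intro habs
      have : (2:Int) ^ (k + 1) ≤ n + 1 := by omega
      have h2 : (2:Nat) ^ (k + 1) ≤ (n + 1).toNat := by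
        have : ((2:Int) ^ (k + 1) : Int) = ((2 ^ (k + 1) : Nat) : Int) := by push_cast; ring
        omega
      have := (Nat.le_log_iff_pow_le (by norm_num) (by omega)).mpr h2
      omega
    simp only [hlt, if_false, hKk]
    have : n - ((2:Int) ^ (k + 1) - 1) + 2 ^ k + 1 = n - 2 ^ k + 2 := by
      have : (2:Int) ^ (k + 1) = 2 ^ k * 2 := by rw [pow_succ]
      omega
    rw [this]
    simp
  | succ d ih =>
    intro k c hpos hk hd
    have hn1 : (0:Int) < n + 1 := lt_of_lt_of_le hpos hk
    have htn : ((n + 1).toNat : Int) = n + 1 := Int.toNat_of_nonneg (by omega)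
    -- k < K, so 2^(k+1) ≤ n+1 and the loop condition holds
    have hkK : k + 1 ≤ Nat.log 2 (n + 1).toNat := by omega
    have hpow : (2:Nat) ^ (k + 1) ≤ (n + 1).toNat :=
      le_trans (Nat.pow_le_pow_right (by norm_num) hkK)
        (Nat.pow_log_le_self 2 (by omega))
    have hk1 : (2:Int) ^ (k + 1) ≤ n + 1 := by
      have : ((2:Int) ^ (k + 1) : Int) = ((2 ^ (k + 1) : Nat) : Int) := by push_cast; ring
      omega
    rw [cotepersonneLoop]
    have hge : n ≥ (2:Int) ^ (k + 1) - 1 := by omega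
    simp only [hge, if_true]
    have hp : (2:Int) ^ (k + 1) - 1 + 2 ^ k * 2 = (2:Int) ^ (k + 1 + 1) - 1 := by
      have h1 : (2:Int) ^ (k + 1) = 2 ^ k * 2 := by rw [pow_succ]
      have h2 : (2:Int) ^ (k + 1 + 1) = 2 ^ (k + 1) * 2 := by rw [pow_succ]
      omega
    have hq : (2:Int) ^ k * 2 = (2:Int) ^ (k + 1) := (pow_succ 2 k).symm
    have hstep :
        cotepersonneLoop n ((2:Int) ^ (k + 1) - 1 + 2 ^ k * 2)
          ⟨(2:Int) ^ k * 2, by positivity⟩ (c + 1) =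
        cotepersonneLoop n ((2:Int) ^ (k + 1 + 1) - 1)
          ⟨(2:Int) ^ (k + 1), by positivity⟩ (c + 1) := by
      congr 1
    rw [hstep, ih (k + 1) (c + 1) (by positivity) hk1 (by omega)]
    have hc : c + 1 + ((Nat.log 2 (n + 1).toNat - (k + 1) : Nat) : Int)
         = c + ((Nat.log 2 (n + 1).toNat - k : Nat) : Int) := by omega
    rw [hc]

-- ===== VERDICT (by name: the statement is the Claim_ definition above) =====
theorem cotepersonne_spec : Claim_equal_cotepersonne := by
  intro n _
  unfold Spec_cotepersonne cotepersonne cotepersonne_alt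
  by_cases hn : n > 0
  · simp only [hn, if_true]
    have hs : cotepersonneLoop n 1 ⟨1, by omega⟩ 0
        = cotepersonneLoop n ((2:Int) ^ (0 + 1) - 1) ⟨(2:Int) ^ 0, by norm_num⟩ 0 := by
      congr 1
    rw [hs, cotepersonneLoop_eq n (Nat.log 2 (n + 1).toNat) 0 0 (by norm_num)
        (by norm_num; omega) (by omega)]
    simp
  · -- n ≤ 0: the loop body never runs
    rw [cotepersonneLoop]
    have : ¬ n ≥ (1:Int) := by omega
    simp only [this, if_false, hn, if_false]
    norm_num
    omega
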